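-- pv_equiv track=rewrite | github.com/MrZloHex/l-sys | src/make_tree.py | instr
-- ===== SOURCE A (Python) =====
-- def lang(key: str) -> str:
--     lang = {
--         "a": "ab",
--         "b": "a"
--     }
--     return lang[key]
--
-- def instr(iterations: int) -> tuple:
--     axiom = "a"
--     for i in range(iterations):
--         instr = ""
--         for char in axiom:
--             instr += lang(char)
--         axiom = instr
--         yield axiom
-- ===== SOURCE B (Python) =====
-- def instr(iterations):
--     prev, cur = "a", "ab"
--     for _ in range(iterations):
--         yield cur
--         prev, cur = cur, cur + prev
-- ===== Notes on version B (the rewrite author's own statement) =====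
-- stated objective: simpler
-- what changed: B drops the per-character rewrite loop and the lang() dict, generating each string from the Fibonacci-word identity Y_i = Y_{i-1} + Y_{i-2} by concatenating the two previous results.
import Mathlib
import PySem

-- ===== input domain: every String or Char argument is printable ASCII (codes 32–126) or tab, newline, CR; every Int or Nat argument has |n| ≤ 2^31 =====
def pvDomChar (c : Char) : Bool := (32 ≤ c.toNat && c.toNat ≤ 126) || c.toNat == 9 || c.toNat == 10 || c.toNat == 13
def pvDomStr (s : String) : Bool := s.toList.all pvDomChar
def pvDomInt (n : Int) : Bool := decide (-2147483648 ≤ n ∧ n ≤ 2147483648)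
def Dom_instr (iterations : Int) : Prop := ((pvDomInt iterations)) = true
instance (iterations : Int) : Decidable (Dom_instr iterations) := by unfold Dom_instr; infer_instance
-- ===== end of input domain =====

-- B drops the per-character rewrite loop and the lang() dict, building each string as the
-- concatenation of the two previous ones (Fibonacci-word identity); objective: simpler.
-- The generator's yields are collected into a List String; strings are carried as List Char (PySem.Chars).

-- ===== PORT A =====
-- lang's dict; the KeyError branch (getD default) is unreachable: axiom only ever holds 'a'/'b'
def langDict : PySem.Dict String String := PySem.Dict.ofList [("a", "ab"), ("b", "a")]

def lang (key : String) : String := (PySem.Dict.get? langDict key).getD ""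

-- state: (axiom, yields so far); one step = inner per-character rewrite loop, then yield axiom
def instrStep (st : List Char × List String) (_ : Int) : List Char × List String :=
  let newInstr := st.1.foldl (fun acc c => acc ++ (lang (String.ofList [c])).toList) []
  (newInstr, st.2 ++ [String.ofList newInstr])

def instr (iterations : Int) : List String :=
  ((PySem.List.pyRange 0 iterations 1).foldl instrStep (['a'], [])).2

-- ===== PORT B =====
-- prev, cur = "a", "ab"; each pass yields cur then sets prev, cur = cur, cur + prev
def fibWords (prev cur : List Char) : Nat → List String
  | 0 => []
  | n + 1 => String.ofList cur :: fibWords cur (cur ++ prev) n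

def instr_alt (iterations : Int) : List String := fibWords ['a'] ['a', 'b'] iterations.toNat

-- ===== PRECONDITION & SPEC =====
def Spec_instr (iterations : Int) (out : List String) : Prop := out = instr_alt iterations
instance (iterations : Int) (out : List String) : Decidable (Spec_instr iterations out) := by unfold Spec_instr; infer_instance

-- ===== CLAIM (what is proved, stated in full; the proofs are below) =====
def Claim_equal_instr : Prop := ∀ (iterations : Int), Dom_instr iterations → Spec_instr iterations (instr iterations)

-- ===== LEMMAS AND PROOFS =====

-- the rewrite map a ↦ ab, b ↦ a as a flatMap over the characters
def rw1 (c : Char) : List Char := (lang (String.ofList [c])).toList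

def rewriteW (l : List Char) : List Char := l.flatMap rw1

lemma inner_eq_rewrite (l : List Char) :
    l.foldl (fun acc c => acc ++ (lang (String.ofList [c])).toList) [] = rewriteW l := by
  have h : ∀ (acc : List Char),
      l.foldl (fun acc c => acc ++ (lang (String.ofList [c])).toList) acc = acc ++ rewriteW l := by
    induction l with
    | nil => intro acc; simp [rewriteW]
    | cons c t ih =>
        intro acc
        simp only [List.foldl_cons, rewriteW, List.flatMap_cons, ih, rw1, List.append_assoc]
  simpa using h []

lemma rewriteW_append (l₁ l₂ : List Char) :
    rewriteW (l₁ ++ l₂) = rewriteW l₁ ++ rewriteW l₂ := by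
  simp [rewriteW]

-- loop invariant: A's state is prev, B's pair is (prev, cur) with cur = rewriteW prev and
-- rewriteW cur = cur ++ prev; then A's remaining yields are exactly fibWords prev cur n.
lemma loop_eq (n : Nat) : ∀ (prev cur : List Char) (acc : List String) (ks : List Int),
    ks.length = n →
    rewriteW prev = cur → rewriteW cur = cur ++ prev →
    (ks.foldl instrStep (prev, acc)).2 = acc ++ fibWords prev cur n := by
  induction n with
  | zero => intro prev cur acc ks hk h1 h2
            rw [List.length_eq_zero_iff.mp hk]; simp [fibWords]
  | succ m ih =>
      intro prev cur acc ks hk h1 h2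
      cases ks with
      | nil => simp at hk
      | cons k kt =>
        simp only [List.length_cons, Nat.succ.injEq] at hk
        simp only [List.foldl_cons, instrStep, inner_eq_rewrite, h1]
        rw [ih cur (cur ++ prev) (acc ++ [String.ofList cur]) kt hk h2
              (by rw [rewriteW_append, h2, h1, List.append_assoc])]
        simp [fibWords]

-- ===== VERDICT (by name: the statement is the Claim_ definition above) =====
theorem instr_spec : Claim_equal_instr := by
  intro iterations _
  show instr iterations = instr_alt iterations
  unfold instr instr_alt
  rw [loop_eq iterations.toNat ['a'] ['a', 'b'] [] (PySem.List.pyRange 0 iterations 1)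
        (by rw [PySem.List.length_pyRange_one]; omega)
        (by decide) (by decide)]
  simp
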